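-- pv_equiv track=rewrite | github.com/kangminchan99/coding_test_python | 프로그래머스/Lv0/Lv0 - 피자 나눠 먹기(2).py | solution
-- ===== SOURCE A (Python) =====
-- def solution(n):
--     pizza = 6
--     cnt = 0
--     while True:
--         if pizza % n == 0:
--             cnt += 1
--             return cnt
--         else:
--             pizza += 6
--             cnt += 1
--             continue
-- ===== SOURCE B (Python) =====
-- from math import gcd
--
-- def solution(n):
--     return abs(n) // gcd(6, n)
-- ===== Notes on version B (the rewrite author's own statement) =====
-- stated objective: faster
-- what changed: Replaces the linear trial loop over multiples of 6 with the closed form abs(n) // gcd(6, n).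
import Mathlib
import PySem

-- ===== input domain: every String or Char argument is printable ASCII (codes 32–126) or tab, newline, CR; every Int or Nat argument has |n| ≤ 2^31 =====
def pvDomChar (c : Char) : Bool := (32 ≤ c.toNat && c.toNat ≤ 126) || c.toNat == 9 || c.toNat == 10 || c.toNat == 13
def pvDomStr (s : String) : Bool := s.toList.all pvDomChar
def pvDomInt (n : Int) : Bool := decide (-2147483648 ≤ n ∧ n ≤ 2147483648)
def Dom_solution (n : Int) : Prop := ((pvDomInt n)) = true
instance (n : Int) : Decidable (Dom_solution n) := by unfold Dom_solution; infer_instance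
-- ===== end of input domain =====

-- B replaces A's linear trial loop over multiples of 6 with the closed form abs(n) // gcd(6, n); asymptotically faster.

-- ===== PORT A =====
-- A's `while True` loop; fuel n.natAbs suffices because the answer is at most |n| steps away
-- (for n = 0 the loop raises on its first `pizza % n`, which Pre_solution excludes).
def solutionLoopA (n : Int) (fuel : Nat) (pizza cnt : Int) : Int :=
  match fuel with
  | 0 => cnt
  | f + 1 =>
    if PySem.Int.mod pizza n = 0 then cnt + 1
    else solutionLoopA n f (pizza + 6) (cnt + 1)

def solution (n : Int) : Int := solutionLoopA n n.natAbs 6 0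

-- ===== PORT B =====
def solution_alt (n : Int) : Int :=
  PySem.Int.floordiv ((n.natAbs : Nat) : Int) ((Int.gcd 6 n : Nat) : Int)

-- ===== PRECONDITION & SPEC =====
-- Pre_ excludes exactly n = 0, where A's `pizza % n` raises ZeroDivisionError.
def Pre_solution (n : Int) : Prop := n ≠ 0
instance (n : Int) : Decidable (Pre_solution n) := by unfold Pre_solution; infer_instance
def pvWitness_solution : Int := 7

def Spec_solution (n : Int) (out : Int) : Prop := out = solution_alt n
instance (n : Int) (out : Int) : Decidable (Spec_solution n out) := by unfold Spec_solution; infer_instance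

-- ===== CLAIM (what is proved, stated in full; the proofs are below) =====
def Claim_equal_solution : Prop := ∀ (n : Int), Dom_solution n → Pre_solution n → Spec_solution n (solution n)

-- ===== LEMMAS AND PROOFS =====

-- divisibility characterisation: for a = |n| > 0, a ∣ 6*k ↔ (a / gcd 6 a) ∣ k
lemma dvd_six_iff (a k : Nat) :
    a ∣ 6 * k ↔ (a / Nat.gcd 6 a) ∣ k := by
  set g := Nat.gcd 6 a with hg
  have hgpos : 0 < g := Nat.gcd_pos_of_pos_left a (by norm_num)
  have h6 : g * (6 / g) = 6 := Nat.mul_div_cancel' (Nat.gcd_dvd_left 6 a)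
  have ha' : g * (a / g) = a := Nat.mul_div_cancel' (Nat.gcd_dvd_right 6 a)
  have hco : Nat.Coprime (6 / g) (a / g) := Nat.coprime_div_gcd_div_gcd hgpos
  constructor
  · intro h
    have h' : g * (a / g) ∣ g * ((6 / g) * k) := by
      rw [ha', ← mul_assoc, h6]; exact h
    have h'' : (a / g) ∣ (6 / g) * k := (Nat.mul_dvd_mul_iff_left hgpos).mp h'
    exact (Nat.Coprime.dvd_of_dvd_mul_left (Nat.Coprime.symm hco) h'')
  · intro h
    calc a = g * (a / g) := ha'.symm
    _ ∣ 6 * k := by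
      rw [← h6, mul_assoc]
      exact Nat.mul_dvd_mul (dvd_refl g) (Dvd.dvd.mul_left h (6 / g))

lemma loopA_eq (n : Int) :
    ∀ (fuel c : Nat), c < n.natAbs / Nat.gcd 6 n.natAbs →
      n.natAbs / Nat.gcd 6 n.natAbs ≤ c + fuel →
      solutionLoopA n fuel (6 * ((c : Int) + 1)) (c : Int) =
        ((n.natAbs / Nat.gcd 6 n.natAbs : Nat) : Int) := by
  intro fuel
  induction fuel with
  | zero => intro c h1 h2; omega
  | succ f ih =>
    intro c h1 h2
    have hdvd : (PySem.Int.mod (6 * ((c : Int) + 1)) n = 0) ↔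
        (n.natAbs / Nat.gcd 6 n.natAbs) ∣ (c + 1) := by
      rw [PySem.Int.mod_eq_zero_iff_dvd]
      have : (6 * ((c : Int) + 1)) = ((6 * (c + 1) : Nat) : Int) := by push_cast; ring
      rw [this, ← Int.natAbs_dvd, Int.natCast_dvd_natCast]
      exact dvd_six_iff n.natAbs (c + 1)
    by_cases hc : c + 1 = n.natAbs / Nat.gcd 6 n.natAbs
    · have : PySem.Int.mod (6 * ((c : Int) + 1)) n = 0 := hdvd.mpr (hc ▸ dvd_refl _)
      simp only [solutionLoopA, this]
      push_cast [← hc]; ring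
    · have hlt : c + 1 < n.natAbs / Nat.gcd 6 n.natAbs := by omega
      have hnd : ¬ PySem.Int.mod (6 * ((c : Int) + 1)) n = 0 := by
        rw [hdvd]
        intro h
        exact absurd (Nat.le_of_dvd (by omega) h) (by omega)
      simp only [solutionLoopA, hnd, if_false]
      have := ih (c + 1) hlt (by omega)
      have harg : (6 * ((c : Int) + 1) + 6) = 6 * (((c + 1 : Nat) : Int) + 1) := by
        push_cast; ring
      have hcnt : ((c : Int) + 1) = ((c + 1 : Nat) : Int) := by push_cast; ring
      rw [harg, hcnt]
      exact this

-- ===== VERDICT (by name: the statement is the Claim_ definition above) =====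
theorem solution_spec : Claim_equal_solution := by
  intro n _ hn
  unfold Spec_solution solution solution_alt
  have hapos : 0 < n.natAbs := Int.natAbs_pos.mpr hn
  have hgpos : 0 < Nat.gcd 6 n.natAbs := Nat.gcd_pos_of_pos_left _ (by norm_num)
  have htpos : 0 < n.natAbs / Nat.gcd 6 n.natAbs :=
    Nat.div_pos (Nat.le_of_dvd hapos (Nat.gcd_dvd_right 6 n.natAbs)) hgpos
  have htle : n.natAbs / Nat.gcd 6 n.natAbs ≤ n.natAbs := Nat.div_le_self _ _
  have hloop := loopA_eq n n.natAbs 0 htpos (by omega)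
  norm_num at hloop
  rw [hloop]
  rw [show (Int.gcd 6 n : Int) = ((Nat.gcd 6 n.natAbs : Nat) : Int) by
        simp [Int.gcd]]
  rw [PySem.Int.floordiv_natCast, Int.abs_eq_natAbs]
  exact (Int.natCast_div _ _).symm
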